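-- pv_equiv track=rewrite | github.com/thegreywalker/Bite-Of-Python | All in One List Program.py | ZeroinPrime
-- ===== SOURCE A (Python) =====
-- def ZeroinPrime(ls: list) -> str:
--     for index, val in enumerate(ls):
--         for value in range(2, val):
--             if ls[index]%value == 0:
--                 break
--         else:
--             ls[index] = 0
--     return "The Modified List where Prime Elements are Zero is {}"\
--         .format(ls)
-- ===== SOURCE B (Python) =====
-- def _is_prime(v):
--     # trial division by candidate divisors up to sqrt(v) only
--     d = 2
--     while d * d <= v:
--         if v % d == 0:
--             return False
--         d += 1
--     return True
--
--
-- def ZeroinPrime(ls: list) -> str: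
--     ls[:] = [0 if v < 3 or _is_prime(v) else v for v in ls]
--     return "The Modified List where Prime Elements are Zero is {}".format(ls)
-- ===== Notes on version B (the rewrite author's own statement) =====
-- stated objective: faster
-- what changed: B rebuilds the list in one comprehension, deciding each element with a trial-division primality test whose divisor search stops at sqrt(v), instead of A's in-place index loop that trial-divides by every value in range(2, v).
import Mathlib
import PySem

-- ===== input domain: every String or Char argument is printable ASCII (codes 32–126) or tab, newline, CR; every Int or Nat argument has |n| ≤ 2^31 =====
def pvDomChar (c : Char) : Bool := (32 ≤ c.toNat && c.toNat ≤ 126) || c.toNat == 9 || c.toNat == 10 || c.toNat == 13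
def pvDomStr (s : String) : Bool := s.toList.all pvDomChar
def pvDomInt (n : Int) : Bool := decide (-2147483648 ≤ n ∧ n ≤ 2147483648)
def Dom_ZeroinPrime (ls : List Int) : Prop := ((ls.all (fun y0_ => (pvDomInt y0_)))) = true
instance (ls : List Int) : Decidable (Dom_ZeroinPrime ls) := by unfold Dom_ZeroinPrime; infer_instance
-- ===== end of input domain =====

-- B replaces A's per-element trial division over all of range(2, v) by a divisor search
-- stopping at sqrt(v), in one list-rebuilding pass (objective: faster).
-- Both A and B mutate ls in place the same way; the theorems are about the return value.

-- str(ls) for a list of ints, e.g. "[1, 2, 3]" (formatting helper shared by both ports)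
def pvIntListStr (ls : List Int) : String :=
  "[" ++ PySem.Str.join ", " (ls.map PySem.Int.toStr) ++ "]"

-- ===== PORT A =====
-- the body of A's outer for-loop: read ls[index]; trial-divide by range(2, val);
-- 'break' keeps the element, the for-else zeroes it
def pvLoopStep (acc : List Int) (index : Nat) : List Int :=
  let val := PySem.List.pyGetD acc (index : Int) 0   -- index is always in range here
  if (PySem.List.pyRange 2 val 1).any (fun value =>
        PySem.Int.mod (PySem.List.pyGetD acc (index : Int) 0) value == 0)
  then acc
  else acc.set index 0

def ZeroinPrime (ls : List Int) : String :=
  -- for index, val in enumerate(ls): mutation only touches the current slot after reading it,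
  -- so iterating the live list is a foldl over the indices reading from the accumulator
  let ls' := (List.range ls.length).foldl pvLoopStep ls
  "The Modified List where Prime Elements are Zero is " ++ pvIntListStr ls'

-- ===== PORT B =====
-- while d * d <= v: if v % d == 0: return False; d += 1
def pvIsPrimeGo (v : Int) (d : Int) : Bool :=
  if h : d * d ≤ v then
    if PySem.Int.mod v d == 0 then false
    else pvIsPrimeGo v (d + 1)
  else true
termination_by (v + 1 - d).toNat
decreasing_by
  have hdv : d ≤ v := by
    by_cases h0 : d ≤ 0
    · have := mul_self_nonneg d; omega
    · nlinarith
  omega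

def pvIsPrime (v : Int) : Bool := pvIsPrimeGo v 2

def ZeroinPrime_alt (ls : List Int) : String :=
  let ls' := ls.map (fun v => if v < 3 || pvIsPrime v then 0 else v)
  "The Modified List where Prime Elements are Zero is " ++ pvIntListStr ls'

-- ===== PRECONDITION & SPEC =====
def Spec_ZeroinPrime (ls : List Int) (out : String) : Prop := out = ZeroinPrime_alt ls
instance (ls : List Int) (out : String) : Decidable (Spec_ZeroinPrime ls out) := by unfold Spec_ZeroinPrime; infer_instance

-- ===== CLAIM (what is proved, stated in full; the proofs are below) =====
def Claim_equal_ZeroinPrime : Prop := ∀ (ls : List Int), Dom_ZeroinPrime ls → Spec_ZeroinPrime ls (ZeroinPrime ls)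

-- ===== LEMMAS AND PROOFS =====

-- A's per-element transformation
def pvStepA (v : Int) : Int :=
  if (PySem.List.pyRange 2 v 1).any (fun value => PySem.Int.mod v value == 0) then v else 0

-- B's per-element transformation
def pvStepB (v : Int) : Int := if v < 3 || pvIsPrime v then 0 else v

-- characterisation of the sqrt-bounded divisor search
lemma pvIsPrimeGo_eq_true_iff (v : Int) :
    ∀ (d : Int), 2 ≤ d →
    (pvIsPrimeGo v d = true ↔ ∀ k : Int, d ≤ k → k * k ≤ v → ¬ (k ∣ v)) := by
  suffices H : ∀ n : ℕ, ∀ d : Int, 2 ≤ d → (v + 1 - d).toNat = n →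
      (pvIsPrimeGo v d = true ↔ ∀ k : Int, d ≤ k → k * k ≤ v → ¬ (k ∣ v)) by
    intro d hd; exact H _ d hd rfl
  intro n
  induction n using Nat.strong_induction_on with
  | _ n ih =>
    intro d hd hn
    rw [pvIsPrimeGo]
    by_cases h : d * d ≤ v
    · rw [dif_pos h]
      by_cases hm : PySem.Int.mod v d = 0
      · simp only [hm, BEq.rfl, if_true]
        constructor
        · intro hfalse; exact absurd hfalse (by simp)
        · intro hall
          exact absurd ((PySem.Int.mod_eq_zero_iff_dvd v d).mp hm) (hall d le_rfl h)
      · have hdv : d ≤ v := by nlinarith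
        rw [if_neg (by simpa using hm),
            ih ((v + 1 - (d + 1)).toNat) (by omega) (d + 1) (by omega) rfl]
        constructor
        · intro hrec k hk hkk
          rcases eq_or_lt_of_le hk with heq | hk'
          · exact fun hdvd => hm (by rw [heq]; exact (PySem.Int.mod_eq_zero_iff_dvd v k).mpr hdvd)
          · exact hrec k (by omega) hkk
        · intro hall k hk hkk
          exact hall k (by omega) hkk
    · rw [dif_neg h]
      simp only [true_iff]
      intro k hk hkk hdvd
      exact h (by nlinarith)

-- the divisor-range reduction: a divisor in [2, v) exists iff one with k*k ≤ v exists
lemma pvDivisor_iff (v : Int) (hv : 3 ≤ v) :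
    (∃ k : Int, 2 ≤ k ∧ k < v ∧ k ∣ v) ↔ (∃ k : Int, 2 ≤ k ∧ k * k ≤ v ∧ k ∣ v) := by
  constructor
  · rintro ⟨k, hk2, hkv, e, he⟩
    by_cases hkk : k * k ≤ v
    · exact ⟨k, hk2, hkk, e, he⟩
    · rw [not_le] at hkk
      have hk0 : 0 < k := by omega
      have he1 : 1 ≤ e := by nlinarith
      have hek : e < k := by nlinarith
      have he2 : 2 ≤ e := by
        rcases eq_or_lt_of_le he1 with rfl | h1
        · omega
        · omega
      exact ⟨e, he2, by nlinarith, k, by rw [he]; ring⟩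
  · rintro ⟨k, hk2, hkk, hdvd⟩
    exact ⟨k, hk2, by nlinarith, hdvd⟩

lemma pvAny_iff (v : Int) :
    ((PySem.List.pyRange 2 v 1).any fun value => PySem.Int.mod v value == 0) = true ↔
      ∃ k : Int, 2 ≤ k ∧ k < v ∧ k ∣ v := by
  simp only [List.any_eq_true, PySem.List.mem_pyRange_one, beq_iff_eq,
    PySem.Int.mod_eq_zero_iff_dvd]
  tauto

lemma pvStep_eq (v : Int) : pvStepA v = pvStepB v := by
  unfold pvStepA pvStepB
  by_cases hv : v < 3
  · rw [PySem.List.pyRange_one_eq_nil (by omega)]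
    simp [hv]
  · rw [not_lt] at hv
    by_cases hA : ((PySem.List.pyRange 2 v 1).any fun value => PySem.Int.mod v value == 0) = true
    · have hP : pvIsPrime v = false := by
        rcases (pvDivisor_iff v hv).mp ((pvAny_iff v).mp hA) with ⟨k, hk2, hkk, hdvd⟩
        by_contra hT
        rw [Bool.not_eq_false] at hT
        exact (pvIsPrimeGo_eq_true_iff v 2 le_rfl).mp hT k hk2 hkk hdvd
      have h3 : ¬ v < 3 := by omega
      simp [hA, hP, h3]
    · have hP : pvIsPrime v = true := by
        refine (pvIsPrimeGo_eq_true_iff v 2 le_rfl).mpr ?_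
        intro k hk hkk hdvd
        exact hA ((pvAny_iff v).mpr ((pvDivisor_iff v hv).mpr ⟨k, hk, hkk, hdvd⟩))
      rw [Bool.not_eq_true] at hA
      simp [hA, hP]

lemma pvGetD_append (pre : List Int) (v : Int) (rest : List Int) :
    PySem.List.pyGetD (pre ++ v :: rest) ((pre.length : Nat) : Int) 0 = v := by
  rw [PySem.List.pyGetD_natCast]
  rw [List.getD_eq_getElem?_getD, List.getElem?_append_right le_rfl]
  simp

lemma pvSet_append (pre : List Int) (v x : Int) (rest : List Int) :
    (pre ++ v :: rest).set pre.length x = pre ++ x :: rest := by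
  induction pre with
  | nil => rfl
  | cons a pre ih => simp [ih]

lemma pvLoop_aux (suf : List Int) :
    ∀ pre : List Int,
    (List.range' pre.length suf.length).foldl pvLoopStep (pre ++ suf) =
      pre ++ suf.map pvStepA := by
  induction suf with
  | nil => intro pre; simp
  | cons v rest ih =>
    intro pre
    have hr : List.range' pre.length (rest.length + 1) =
        pre.length :: List.range' (pre.length + 1) rest.length := rfl
    simp only [List.length_cons, hr, List.foldl_cons]
    have hstep : pvLoopStep (pre ++ v :: rest) pre.length =
        pre ++ pvStepA v :: rest := by
      unfold pvLoopStep pvStepA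
      rw [pvGetD_append]
      by_cases hA : ((PySem.List.pyRange 2 v 1).any fun value => PySem.Int.mod v value == 0) = true
      · rw [if_pos hA, if_pos hA]
      · rw [if_neg hA, if_neg hA, pvSet_append]
    rw [hstep]
    have := ih (pre ++ [pvStepA v])
    simpa [List.append_assoc] using this
lemma pvLoopA_eq_map (ls : List Int) :
    (List.range ls.length).foldl pvLoopStep ls = ls.map pvStepA := by
  have := pvLoop_aux ls []
  simpa [List.range_eq_range'] using this

-- ===== VERDICT (by name: the statement is the Claim_ definition above) =====
theorem ZeroinPrime_spec : Claim_equal_ZeroinPrime := by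
  intro ls _
  unfold Spec_ZeroinPrime ZeroinPrime ZeroinPrime_alt
  rw [pvLoopA_eq_map]
  have h : ls.map pvStepA = ls.map (fun v => if v < 3 || pvIsPrime v then 0 else v) := by
    apply List.map_congr_left
    intro v _
    rw [pvStep_eq]; rfl
  rw [h]
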